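-- pv_equiv track=rewrite | github.com/lloydnguyen96/ML_AutomaticLicensePlateRecognition | characterSegmentation.py | find_list_of_local_minimum_of_intensity_sum_index
-- ===== SOURCE A (Python) =====
-- def find_list_of_local_minimum_of_intensity_sum_index(listOfIntensitySum, shiftAwayLocalMinimum, threshold):
-- 	listOfLocalMinimumOfIntensitySumIndex = []
-- 	listOfIntensitySumLength = len(listOfIntensitySum)
-- 	if listOfIntensitySumLength == 0:
-- 		return listOfLocalMinimumOfIntensitySumIndex
-- 	globalMinimumOfIntensitySum = min(listOfIntensitySum)
-- 	if globalMinimumOfIntensitySum < threshold: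
-- 		globalMinimumOfIntensitySumIndex = listOfIntensitySum.index(globalMinimumOfIntensitySum)
-- 		listOfLocalMinimumOfIntensitySumIndex.append(globalMinimumOfIntensitySumIndex)
-- 		if globalMinimumOfIntensitySumIndex - shiftAwayLocalMinimum >= 0 and globalMinimumOfIntensitySumIndex + shiftAwayLocalMinimum <= listOfIntensitySumLength - 1:
-- 			listLeftOfIntensitySum = listOfIntensitySum[0:globalMinimumOfIntensitySumIndex - shiftAwayLocalMinimum]
-- 			listLeftOfLocalMinimumOfIntensitySumIndex = find_list_of_local_minimum_of_intensity_sum_index(listLeftOfIntensitySum, shiftAwayLocalMinimum, threshold)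
-- 			listRightOfIntensitySum = listOfIntensitySum[globalMinimumOfIntensitySumIndex + shiftAwayLocalMinimum:listOfIntensitySumLength]
-- 			listRightOfLocalMinimumOfIntensitySumIndex = find_list_of_local_minimum_of_intensity_sum_index(listRightOfIntensitySum, shiftAwayLocalMinimum, threshold)
-- 			listRightOfLocalMinimumOfIntensitySumIndex = [(element + globalMinimumOfIntensitySumIndex + shiftAwayLocalMinimum) for element in listRightOfLocalMinimumOfIntensitySumIndex]
-- 			listOfLocalMinimumOfIntensitySumIndex = listOfLocalMinimumOfIntensitySumIndex + listLeftOfLocalMinimumOfIntensitySumIndex + listRightOfLocalMinimumOfIntensitySumIndex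
-- 		elif globalMinimumOfIntensitySumIndex - shiftAwayLocalMinimum >= 0 and globalMinimumOfIntensitySumIndex + shiftAwayLocalMinimum > listOfIntensitySumLength - 1:
-- 			listLeftOfIntensitySum = listOfIntensitySum[0:globalMinimumOfIntensitySumIndex - shiftAwayLocalMinimum]
-- 			listLeftOfLocalMinimumOfIntensitySumIndex = find_list_of_local_minimum_of_intensity_sum_index(listLeftOfIntensitySum, shiftAwayLocalMinimum, threshold)
-- 			listOfLocalMinimumOfIntensitySumIndex = listOfLocalMinimumOfIntensitySumIndex + listLeftOfLocalMinimumOfIntensitySumIndex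
-- 		elif globalMinimumOfIntensitySumIndex - shiftAwayLocalMinimum < 0 and globalMinimumOfIntensitySumIndex + shiftAwayLocalMinimum <= listOfIntensitySumLength - 1:
-- 			listRightOfIntensitySum = listOfIntensitySum[globalMinimumOfIntensitySumIndex + shiftAwayLocalMinimum:listOfIntensitySumLength]
-- 			listRightOfLocalMinimumOfIntensitySumIndex = find_list_of_local_minimum_of_intensity_sum_index(listRightOfIntensitySum, shiftAwayLocalMinimum, threshold)
-- 			listRightOfLocalMinimumOfIntensitySumIndex = [(element + globalMinimumOfIntensitySumIndex + shiftAwayLocalMinimum) for element in listRightOfLocalMinimumOfIntensitySumIndex]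
-- 			listOfLocalMinimumOfIntensitySumIndex = listOfLocalMinimumOfIntensitySumIndex + listRightOfLocalMinimumOfIntensitySumIndex
-- 		else:
-- 			pass
-- 		listOfLocalMinimumOfIntensitySumIndex.sort()
-- 		return listOfLocalMinimumOfIntensitySumIndex
-- 	else:
-- 		return listOfLocalMinimumOfIntensitySumIndex
-- ===== SOURCE B (Python) =====
-- def find_list_of_local_minimum_of_intensity_sum_index(listOfIntensitySum, shiftAwayLocalMinimum, threshold):
-- 	# Greedy over a single global sort: visit indices in increasing order of
-- 	# intensity (stable, so ties are visited left-to-right); accept an index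
-- 	# unless it lies in the exclusion window [g-shift, g+shift-1] of an already
-- 	# accepted index g; stop as soon as values reach the threshold.
-- 	xs = listOfIntensitySum
-- 	s = shiftAwayLocalMinimum
-- 	order = sorted(range(len(xs)), key=lambda i: xs[i])
-- 	accepted = []
-- 	for i in order:
-- 		if xs[i] >= threshold:
-- 			break
-- 		if all(not (g - s <= i <= g + s - 1) for g in accepted):
-- 			accepted.append(i)
-- 	return sorted(accepted)
-- ===== Notes on version B (the rewrite author's own statement) =====
-- stated objective: alternative
-- what changed: B abandons A's recursive global-min partitioning (slice copies, min()+.index() rescans, index re-shifting and a sort per recursion level) for a single stable sort of the indices by intensity followed by one greedy scan that accepts an index unless it lies in the exclusion window [g-shift, g+shift-1] of an already accepted index g, with one final sort.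
import Mathlib
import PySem

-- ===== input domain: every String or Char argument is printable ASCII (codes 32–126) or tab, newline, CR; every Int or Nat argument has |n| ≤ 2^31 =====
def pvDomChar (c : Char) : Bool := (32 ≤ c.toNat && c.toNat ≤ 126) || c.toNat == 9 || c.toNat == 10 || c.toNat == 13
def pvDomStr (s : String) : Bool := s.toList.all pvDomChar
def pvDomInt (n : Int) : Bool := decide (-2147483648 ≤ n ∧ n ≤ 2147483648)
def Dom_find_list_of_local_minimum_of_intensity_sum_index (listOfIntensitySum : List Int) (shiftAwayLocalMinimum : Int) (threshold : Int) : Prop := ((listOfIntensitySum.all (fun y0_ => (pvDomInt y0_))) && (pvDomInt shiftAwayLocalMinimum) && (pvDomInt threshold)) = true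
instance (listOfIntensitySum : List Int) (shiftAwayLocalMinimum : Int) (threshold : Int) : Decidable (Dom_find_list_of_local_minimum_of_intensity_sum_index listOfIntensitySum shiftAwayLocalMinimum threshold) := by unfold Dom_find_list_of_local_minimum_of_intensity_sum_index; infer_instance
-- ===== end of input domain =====

-- B replaces A's recursive global-min partitioning (slice, min()+.index(), shift, re-sort per
-- level) by one stable sort of the indices by intensity followed by a greedy scan that accepts
-- an index unless it falls in the exclusion window of an already accepted one; equivalence is
-- proved on Pre_ (A does not return outside it).

-- ===== PORT A =====
-- Fuel only makes A's recursion total in Lean; under Pre_ the recursion depth is at most the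
-- list length, so the fuel is never exhausted and the port follows A step for step.
def fAuxA : Nat → List Int → Int → Int → List Int
  | 0, _, _, _ => []
  | fuel+1, xs, shift, thr =>
    if xs.length = 0 then []
    else
      match PySem.List.min? xs (fun x => x) with
      | none => []
      | some m =>
        if m < thr then
          match PySem.List.index? xs m with
          | none => []
          | some jn =>
            let n : Int := (xs.length : Int)
            let g : Int := (jn : Int)
            let res :=
              if g - shift ≥ 0 ∧ g + shift ≤ n - 1 then
                let left := PySem.List.slice xs (some 0) (some (g - shift))
                let ls := fAuxA fuel left shift thr
                let right := PySem.List.slice xs (some (g + shift)) (some n)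
                let rs := (fAuxA fuel right shift thr).map (fun e => e + g + shift)
                [g] ++ ls ++ rs
              else if g - shift ≥ 0 ∧ g + shift > n - 1 then
                let left := PySem.List.slice xs (some 0) (some (g - shift))
                let ls := fAuxA fuel left shift thr
                [g] ++ ls
              else if g - shift < 0 ∧ g + shift ≤ n - 1 then
                let right := PySem.List.slice xs (some (g + shift)) (some n)
                let rs := (fAuxA fuel right shift thr).map (fun e => e + g + shift)
                [g] ++ rs
              else [g]
            PySem.List.sorted res (fun x => x) false
        else []

def find_list_of_local_minimum_of_intensity_sum_index (listOfIntensitySum : List Int) (shiftAwayLocalMinimum : Int) (threshold : Int) : List Int :=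
  fAuxA (listOfIntensitySum.length + 1) listOfIntensitySum shiftAwayLocalMinimum threshold

-- ===== PORT B =====
-- Source B's for-loop over the sorted index order: `break` returns the accepted list as is; the
-- `all(...)` window test and `accepted.append` are transcribed one-to-one.
def bLoop (xs : List Int) (shift thr : Int) : List Int → List Int → List Int
  | [], accepted => accepted
  | i :: rest, accepted =>
    if thr ≤ PySem.List.pyGetD xs i 0 then accepted
    else if accepted.all (fun g => !(decide (g - shift ≤ i ∧ i ≤ g + shift - 1))) then
      bLoop xs shift thr rest (accepted ++ [i])
    else
      bLoop xs shift thr rest accepted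

def find_list_of_local_minimum_of_intensity_sum_index_alt (listOfIntensitySum : List Int) (shiftAwayLocalMinimum : Int) (threshold : Int) : List Int :=
  PySem.List.sorted
    (bLoop listOfIntensitySum shiftAwayLocalMinimum threshold
      (PySem.List.sorted (PySem.List.pyRange 0 (listOfIntensitySum.length : Int) 1)
        (fun i => PySem.List.pyGetD listOfIntensitySum i 0) false)
      [])
    (fun x => x) false

-- ===== PRECONDITION & SPEC =====
-- Pre_ excludes exactly the inputs on which A never returns: with a non-positive shift and some
-- element below the threshold, A recurses forever on a sublist that still contains its minimum
-- (Python dies with RecursionError).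
def Pre_find_list_of_local_minimum_of_intensity_sum_index (listOfIntensitySum : List Int) (shiftAwayLocalMinimum : Int) (threshold : Int) : Prop :=
  1 ≤ shiftAwayLocalMinimum ∨ ∀ x ∈ listOfIntensitySum, threshold ≤ x

instance (listOfIntensitySum : List Int) (shiftAwayLocalMinimum : Int) (threshold : Int) : Decidable (Pre_find_list_of_local_minimum_of_intensity_sum_index listOfIntensitySum shiftAwayLocalMinimum threshold) := by unfold Pre_find_list_of_local_minimum_of_intensity_sum_index; infer_instance

def pvWitness_find_list_of_local_minimum_of_intensity_sum_index : List Int × Int × Int := ([3, 10, 1, 10, 4, 0, 9], 2, 5)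

def Spec_find_list_of_local_minimum_of_intensity_sum_index (listOfIntensitySum : List Int) (shiftAwayLocalMinimum : Int) (threshold : Int) (out : List Int) : Prop := out = find_list_of_local_minimum_of_intensity_sum_index_alt listOfIntensitySum shiftAwayLocalMinimum threshold
instance (listOfIntensitySum : List Int) (shiftAwayLocalMinimum : Int) (threshold : Int) (out : List Int) : Decidable (Spec_find_list_of_local_minimum_of_intensity_sum_index listOfIntensitySum shiftAwayLocalMinimum threshold out) := by unfold Spec_find_list_of_local_minimum_of_intensity_sum_index; infer_instance

-- ===== CLAIM (what is proved, stated in full; the proofs are below) =====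
def Claim_equal_find_list_of_local_minimum_of_intensity_sum_index : Prop := ∀ (listOfIntensitySum : List Int) (shiftAwayLocalMinimum : Int) (threshold : Int), Dom_find_list_of_local_minimum_of_intensity_sum_index listOfIntensitySum shiftAwayLocalMinimum threshold → Pre_find_list_of_local_minimum_of_intensity_sum_index listOfIntensitySum shiftAwayLocalMinimum threshold → Spec_find_list_of_local_minimum_of_intensity_sum_index listOfIntensitySum shiftAwayLocalMinimum threshold (find_list_of_local_minimum_of_intensity_sum_index listOfIntensitySum shiftAwayLocalMinimum threshold)

-- ===== LEMMAS AND PROOFS =====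

-- proof-side interval recursion bridging A's partitioning and B's greedy scan
def bArgmin (xs : List Int) (g i hi : Nat) : Nat :=
  if h : hi ≤ i then g
  else bArgmin xs (if xs.getD i 0 < xs.getD g 0 then i else g) (i+1) hi
termination_by hi - i

def bGo : Nat → List Int → Int → Int → Nat → Nat → List Int
  | 0, _, _, _, _, _ => []
  | fuel+1, xs, shift, thr, lo, hi =>
    if hi ≤ lo then []
    else
      let g := bArgmin xs lo (lo+1) hi
      if thr ≤ xs.getD g 0 then []
      else
        let left := if (g : Int) - shift ≥ (lo : Int) then bGo fuel xs shift thr lo ((g : Int) - shift).toNat else []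
        let right := if (g : Int) + shift ≤ (hi : Int) - 1 then bGo fuel xs shift thr ((g : Int) + shift).toNat hi else []
        (g : Int) :: (left ++ right)

def LAM (xs : List Int) (lo hi r : Nat) : Prop :=
  lo ≤ r ∧ r < hi ∧ (∀ k, lo ≤ k → k < hi → xs.getD r 0 ≤ xs.getD k 0) ∧
    (∀ k, lo ≤ k → k < r → xs.getD r 0 < xs.getD k 0)

theorem LAM_unique {xs : List Int} {lo hi r r' : Nat} (h : LAM xs lo hi r) (h' : LAM xs lo hi r') : r = r' := by
  obtain ⟨h1, h2, h3, h4⟩ := h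
  obtain ⟨h1', h2', h3', h4'⟩ := h'
  rcases Nat.lt_trichotomy r r' with hlt | heq | hgt
  · exact absurd (h3 r' h1' h2') (not_le.mpr (h4' r h1 hlt))
  · exact heq
  · exact absurd (h3' r h1 h2) (not_le.mpr (h4 r' h1' hgt))

def win (xs : List Int) (lo hi : Nat) : List Int := (xs.drop lo).take (hi - lo)

theorem length_win {xs : List Int} {lo hi : Nat} (h : hi ≤ xs.length) (h' : lo ≤ hi) :
    (win xs lo hi).length = hi - lo := by
  simp [win]; omega

theorem getD_win {xs : List Int} {lo hi t : Nat} (h : hi ≤ xs.length) (ht : t < hi - lo) :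
    (win xs lo hi).getD t 0 = xs.getD (lo + t) 0 := by
  have h1 : t < (win xs lo hi).length := by rw [length_win h (by omega)]; omega
  have h2 : lo + t < xs.length := by omega
  rw [List.getD_eq_getElem _ _ h1, List.getD_eq_getElem _ _ h2]
  simp [win]

theorem bArgmin_LAM (xs : List Int) (lo : Nat) (g i hi : Nat) (h3 : i ≤ hi)
    (h4 : LAM xs lo i g) : LAM xs lo hi (bArgmin xs g i hi) := by
  revert h3 h4
  fun_induction bArgmin xs g i hi with
  | case1 g i hle =>
    intro h3 h4
    have : i = hi := le_antisymm h3 hle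
    subst this; exact h4
  | case2 g i hle ih =>
    intro h3 h4
    apply ih (by omega)
    obtain ⟨h1, h2, hmin, hstr⟩ := h4
    by_cases hc : xs.getD i 0 < xs.getD g 0
    · rw [dif_pos hc]
      refine ⟨by omega, by omega, ?_, ?_⟩
      · intro k hk1 hk2
        rcases Nat.lt_or_ge k i with hki | hki
        · exact le_of_lt (lt_of_lt_of_le hc (hmin k hk1 hki))
        · have : k = i := by omega
          subst this; rfl
      · intro k hk1 hk2
        exact lt_of_lt_of_le hc (hmin k hk1 (by omega))
    · rw [dif_neg hc]
      rw [not_lt] at hc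
      refine ⟨h1, by omega, ?_, hstr⟩
      intro k hk1 hk2
      rcases Nat.lt_or_ge k i with hki | hki
      · exact hmin k hk1 hki
      · have : k = i := by omega
        subst this; exact hc

theorem A_LAM {xs : List Int} {lo hi : Nat} {m : Int} {j : Nat} (hhi : hi ≤ xs.length) (hlt : lo < hi)
    (hm : PySem.List.min? (win xs lo hi) (fun x => x) = some m)
    (hj : PySem.List.index? (win xs lo hi) m = some j) :
    LAM xs lo hi (lo + j) ∧ xs.getD (lo + j) 0 = m ∧ j < hi - lo := by
  have hlen : (win xs lo hi).length = hi - lo := length_win hhi (le_of_lt hlt)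
  obtain ⟨hk, hval, hpre⟩ := PySem.List.getElem_of_index?_eq_some hj
  have hmin := PySem.List.min?_isMin hm
  have hjlt : j < hi - lo := by omega
  have hgd : ∀ t, t < hi - lo → (win xs lo hi).getD t 0 = xs.getD (lo + t) 0 :=
    fun t ht => getD_win hhi ht
  have hgde : ∀ t (ht : t < hi - lo), xs.getD (lo + t) 0 = (win xs lo hi)[t]'(by omega) := by
    intro t ht
    rw [← hgd t ht, List.getD_eq_getElem _ _ (by omega)]
  have hjm : xs.getD (lo + j) 0 = m := by rw [hgde j hjlt]; exact hval
  refine ⟨⟨by omega, by omega, ?_, ?_⟩, hjm, hjlt⟩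
  · intro k hk1 hk2
    have ht : k - lo < hi - lo := by omega
    have : xs.getD k 0 = (win xs lo hi)[k - lo]'(by omega) := by
      have := hgde (k - lo) ht
      rwa [Nat.add_sub_cancel' hk1] at this
    rw [hjm, this]
    exact hmin _ (List.getElem_mem _)
  · intro k hk1 hk2
    have ht : k - lo < hi - lo := by omega
    have heq : xs.getD k 0 = (win xs lo hi)[k - lo]'(by omega) := by
      have := hgde (k - lo) ht
      rwa [Nat.add_sub_cancel' hk1] at this
    have hne : (win xs lo hi)[k - lo]'(by omega) ≠ m := hpre (k - lo) (by omega)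
    have hle : m ≤ (win xs lo hi)[k - lo]'(by omega) := hmin _ (List.getElem_mem _)
    rw [hjm, heq]
    exact lt_of_le_of_ne hle (Ne.symm hne)

theorem win_take {xs : List Int} {lo hi t : Nat} (h : t ≤ hi - lo) : (win xs lo hi).take t = win xs lo (lo + t) := by
  simp [win, List.take_take]
  omega

theorem win_drop {xs : List Int} {lo hi s : Nat} : (win xs lo hi).drop s = win xs (lo + s) hi := by
  simp [win, List.drop_take, List.drop_drop]
  congr 1
  omega

theorem right_eq_drop (w : List Int) (g shift : Int) (hge : 0 ≤ g + shift) :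
    PySem.List.slice w (some (g + shift)) (some (w.length : Int)) = w.drop (g + shift).toNat := by
  rw [PySem.List.slice_toNat w hge (by positivity)]
  apply List.take_of_length_le
  simp

theorem nodup_block {g : Int} {L R : List Int} (hL : L.Nodup) (hR : R.Nodup)
    (hLb : ∀ e ∈ L, e < g) (hRb : ∀ e ∈ R, g < e) : (g :: (L ++ R)).Nodup := by
  rw [List.nodup_cons, List.nodup_append]
  refine ⟨?_, hL, hR, ?_⟩
  · intro hmem
    rcases List.mem_append.mp hmem with h | h
    · exact absurd rfl (ne_of_gt (hLb _ h))
    · exact absurd rfl (ne_of_lt (hRb _ h))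
  · intro a ha b hb
    exact ne_of_lt (lt_trans (hLb _ ha) (hRb _ hb))

theorem fAuxA_eq (fuel : Nat) (w : List Int) (shift thr m : Int) (jn : Nat) (hs : 1 ≤ shift)
    (h0 : ¬ w.length = 0) (hm : PySem.List.min? w (fun x => x) = some m) (hthr : m < thr)
    (hj : PySem.List.index? w m = some jn) :
    fAuxA (fuel+1) w shift thr =
      PySem.List.sorted
        ((jn : Int) ::
          ((if 0 ≤ (jn : Int) - shift then fAuxA fuel (w.take ((jn : Int) - shift).toNat) shift thr else []) ++
           (if (jn : Int) + shift ≤ (w.length : Int) - 1 then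
              (fAuxA fuel (w.drop ((jn : Int) + shift).toNat) shift thr).map (fun e => e + (jn : Int) + shift)
            else [])))
        (fun x => x) false := by
  have hj' : List.idxOf? m w = some jn := by
    rw [← PySem.List.index?_eq_idxOf?]; exact hj
  have hjpos : (0:Int) ≤ (jn : Int) := by positivity
  have hrw : PySem.List.slice w (some ((jn:Int) + shift)) (some (w.length : Int)) = w.drop ((jn:Int) + shift).toNat :=
    right_eq_drop w (jn:Int) shift (by omega)
  by_cases a1 : shift ≤ (jn : Int)
  · have c1 : (0:Int) ≤ (jn : Int) - shift := by omega
    by_cases a2 : (jn : Int) + shift < (w.length : Int)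
    · simp [fAuxA, h0, hm, hthr, hj', a1, a2, hrw, PySem.List.slice_to w c1]
    · have a2' : (w.length : Int) ≤ (jn : Int) + shift := by omega
      simp [fAuxA, h0, hm, hthr, hj', a1, a2, a2', PySem.List.slice_to w c1]
  · have c1 : ¬ (0:Int) ≤ (jn : Int) - shift := by omega
    have a1' : (jn : Int) < shift := by omega
    by_cases a2 : (jn : Int) + shift < (w.length : Int)
    · simp [fAuxA, h0, hm, hthr, hj', a1, a1', a2, hrw]
    · have a2' : (w.length : Int) ≤ (jn : Int) + shift := by omega
      simp [fAuxA, h0, hm, hthr, hj', a1, a1', a2, a2']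

theorem fAuxA_sorted (shift thr : Int) (hs : 1 ≤ shift) : ∀ fuel w,
    (fAuxA fuel w shift thr).Pairwise (· < ·) ∧
      ∀ e ∈ fAuxA fuel w shift thr, 0 ≤ e ∧ e < (w.length : Int) := by
  intro fuel
  induction fuel with
  | zero => intro w; simp [fAuxA]
  | succ fuel ih =>
    intro w
    by_cases h0 : w.length = 0
    · simp [fAuxA, h0]
    · cases hm : PySem.List.min? w (fun x => x) with
      | none => simp [fAuxA, h0, hm]
      | some m =>
        by_cases hthr : m < thr
        · cases hj : PySem.List.index? w m with
          | none =>
            have hj' : List.idxOf? m w = none := by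
              rw [← PySem.List.index?_eq_idxOf?]; exact hj
            simp [fAuxA, h0, hm, hthr, hj']
          | some jn =>
            have hj' : List.idxOf? m w = some jn := by
              rw [← PySem.List.index?_eq_idxOf?]; exact hj
            obtain ⟨hjlt, -, -⟩ := PySem.List.getElem_of_index?_eq_some hj
            have main : ∀ (L R : List Int), L.Nodup → R.Nodup →
                (∀ e ∈ L, 0 ≤ e ∧ e < (jn : Int) - shift) →
                (∀ e ∈ R, (jn : Int) + shift ≤ e ∧ e < (w.length : Int)) →
                (PySem.List.sorted ((jn : Int) :: (L ++ R)) (fun x => x) false).Pairwise (· < ·) ∧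
                  ∀ e ∈ PySem.List.sorted ((jn : Int) :: (L ++ R)) (fun x => x) false,
                    0 ≤ e ∧ e < (w.length : Int) := by
              intro L R hLn hRn hLb hRb
              have hnd : ((jn : Int) :: (L ++ R)).Nodup :=
                nodup_block hLn hRn (fun e he => by have := hLb e he; omega)
                  (fun e he => by have := hRb e he; omega)
              constructor
              · have hle := PySem.List.sorted_pairwise ((jn : Int) :: (L ++ R)) (fun x => x)
                have hnd2 : (PySem.List.sorted ((jn : Int) :: (L ++ R)) (fun x => x) false).Nodup :=
                  ((PySem.List.sorted_perm ((jn : Int) :: (L ++ R)) (fun x => x) false).nodup_iff).mpr hnd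
                exact (hle.and hnd2).imp fun h => lt_of_le_of_ne h.1 h.2
              · intro e he
                rw [PySem.List.mem_sorted] at he
                rcases List.mem_cons.mp he with rfl | he
                · constructor <;> [positivity; exact_mod_cast hjlt]
                · rcases List.mem_append.mp he with h | h
                  · have := hLb e h; have : (jn:Int) < w.length := by exact_mod_cast hjlt
                    omega
                  · have := hRb e h; omega
            rw [fAuxA_eq fuel w shift thr m jn hs h0 hm hthr hj]
            apply main
            · split
              · exact (ih _).1.imp fun h => ne_of_lt h
              · exact List.nodup_nil
            · split
              · exact List.Nodup.map (fun a b hab => by omega)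
                  ((ih _).1.imp fun h => ne_of_lt h)
              · exact List.nodup_nil
            · intro e he
              split at he
              · rename_i hc
                obtain ⟨he0, he1⟩ := (ih _).2 e he
                refine ⟨he0, lt_of_lt_of_le he1 ?_⟩
                simp
                omega
              · simp at he
            · intro e he
              split at he
              · rename_i hc
                obtain ⟨e0, he0, rfl⟩ := List.mem_map.mp he
                obtain ⟨hb0, hb1⟩ := (ih _).2 e0 he0
                simp at hb1
                constructor <;> omega
              · simp at he
        · simp [fAuxA, h0, hm, hthr]

theorem main_perm (xs : List Int) (shift thr : Int) (hs : 1 ≤ shift) : ∀ fuel lo hi, lo ≤ hi → hi ≤ xs.length → hi - lo < fuel →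
    ((fAuxA fuel (win xs lo hi) shift thr).map (fun e => e + (lo : Int))).Perm
      (bGo fuel xs shift thr lo hi) := by
  intro fuel
  induction fuel with
  | zero => intro lo hi h1 h2 h3; omega
  | succ fuel ih =>
    intro lo hi h1 h2 h3
    by_cases hle : hi ≤ lo
    · have hwin : win xs lo hi = [] := by
        have : hi - lo = 0 := by omega
        simp [win, this]
      simp [bGo, hle, fAuxA, hwin]
    · have hlt : lo < hi := by omega
      have hwlen : (win xs lo hi).length = hi - lo := length_win h2 h1
      have hw0 : ¬ (win xs lo hi).length = 0 := by omega
      cases hm : PySem.List.min? (win xs lo hi) (fun x => x) with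
      | none =>
        rw [PySem.List.min?_eq_none_iff] at hm
        rw [hm] at hwlen; simp at hwlen; omega
      | some m =>
        have hmem : m ∈ win xs lo hi := PySem.List.min?_mem hm
        have hsome : (PySem.List.index? (win xs lo hi) m).isSome :=
          (PySem.List.index?_isSome_iff _ _).mpr hmem
        obtain ⟨jn, hj⟩ := Option.isSome_iff_exists.mp hsome
        obtain ⟨hlam, hval, hjlt⟩ := A_LAM h2 hlt hm hj
        have hbase : LAM xs lo (lo+1) lo := by
          refine ⟨le_refl _, by omega, ?_, ?_⟩
          · intro k hk1 hk2
            have : k = lo := by omega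
            subst this; rfl
          · intro k hk1 hk2; omega
        have hgl : LAM xs lo hi (bArgmin xs lo (lo+1) hi) :=
          bArgmin_LAM xs lo lo (lo+1) hi (by omega) hbase
        have hgeq : lo + jn = bArgmin xs lo (lo+1) hi := LAM_unique hlam hgl
        have hgd : xs.getD (bArgmin xs lo (lo+1) hi) 0 = m := by rw [← hgeq]; exact hval
        by_cases hthr : m < thr
        · rw [fAuxA_eq fuel (win xs lo hi) shift thr m jn hs hw0 hm hthr hj]
          have hnt : ¬ thr ≤ xs.getD (bArgmin xs lo (lo+1) hi) 0 := by rw [hgd]; omega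
          simp only [bGo, if_neg hle, if_neg hnt]
          refine ((PySem.List.sorted_perm _ _ _).map _).trans ?_
          simp only [List.map_cons, List.map_append]
          have hhead : (jn : Int) + (lo : Int) = ((bArgmin xs lo (lo+1) hi : Nat) : Int) := by
            rw [← hgeq]; push_cast; ring
          rw [hhead]
          refine List.Perm.cons _ (List.Perm.append ?_ ?_)
          · by_cases c1 : (0:Int) ≤ (jn : Int) - shift
            · have hc1' : ((bArgmin xs lo (lo+1) hi : Nat) : Int) - shift ≥ (lo : Int) := by
                rw [← hgeq]; push_cast; omega
              rw [if_pos c1, if_pos hc1']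
              have ht : ((jn : Int) - shift).toNat ≤ hi - lo := by omega
              rw [win_take ht]
              have harg : (((bArgmin xs lo (lo+1) hi : Nat) : Int) - shift).toNat = lo + ((jn : Int) - shift).toNat := by
                rw [← hgeq]; push_cast; omega
              rw [harg]
              exact ih lo (lo + ((jn : Int) - shift).toNat) (by omega) (by omega) (by omega)
            · have hc1' : ¬ ((bArgmin xs lo (lo+1) hi : Nat) : Int) - shift ≥ (lo : Int) := by
                rw [← hgeq]; push_cast; omega
              rw [if_neg c1, if_neg hc1']
              simp
          · by_cases c2 : (jn : Int) + shift ≤ (((win xs lo hi).length : Nat) : Int) - 1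
            · have hwl : ((win xs lo hi).length : Int) = (hi : Int) - (lo : Int) := by
                rw [hwlen]; omega
              rw [hwl] at c2
              have hc2' : ((bArgmin xs lo (lo+1) hi : Nat) : Int) + shift ≤ (hi : Int) - 1 := by
                rw [← hgeq]; push_cast; omega
              rw [if_pos hc2']
              have hcongr : (if (jn : Int) + shift ≤ ((win xs lo hi).length : Int) - 1 then
                  (fAuxA fuel ((win xs lo hi).drop ((jn : Int) + shift).toNat) shift thr).map (fun e => e + (jn : Int) + shift)
                else []) = (fAuxA fuel ((win xs lo hi).drop ((jn : Int) + shift).toNat) shift thr).map (fun e => e + (jn : Int) + shift) := by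
                rw [if_pos (by rw [hwl]; exact c2)]
              rw [hcongr]
              rw [win_drop (s := ((jn : Int) + shift).toNat)]
              have harg : (((bArgmin xs lo (lo+1) hi : Nat) : Int) + shift).toNat = lo + ((jn : Int) + shift).toNat := by
                rw [← hgeq]; push_cast; omega
              rw [harg]
              have hmm : (List.map (fun e => e + (jn : Int) + shift) (fAuxA fuel (win xs (lo + ((jn : Int) + shift).toNat) hi) shift thr)).map (fun e => e + (lo : Int)) =
                  (fAuxA fuel (win xs (lo + ((jn : Int) + shift).toNat) hi) shift thr).map (fun e => e + ((lo + ((jn : Int) + shift).toNat : Nat) : Int)) := by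
                rw [List.map_map]
                apply List.map_congr_left
                intro a _
                simp only [Function.comp_apply]
                push_cast
                omega
              rw [hmm]
              exact ih (lo + ((jn : Int) + shift).toNat) hi (by omega) h2 (by omega)
            · have hwl : ((win xs lo hi).length : Int) = (hi : Int) - (lo : Int) := by
                rw [hwlen]; omega
              rw [hwl] at c2
              have hc2' : ¬ ((bArgmin xs lo (lo+1) hi : Nat) : Int) + shift ≤ (hi : Int) - 1 := by
                rw [← hgeq]; push_cast; omega
              rw [if_neg hc2', if_neg (by rw [hwl]; exact c2)]
              simp
        · have hA : fAuxA (fuel+1) (win xs lo hi) shift thr = [] := by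
            simp [fAuxA, hw0, hm, hthr]
          have hnt : thr ≤ xs.getD (bArgmin xs lo (lo+1) hi) 0 := by rw [hgd]; omega
          simp [bGo, hle, hA]
          rw [← List.getD_eq_getElem?_getD]
          exact hnt

-- ===== B-side machinery: greedy over the sorted order =====

def vv (xs : List Int) (i : Int) : Int := PySem.List.pyGetD xs i 0

def blk (s i : Int) (B : List Int) : Bool := B.any (fun g => decide (g - s ≤ i ∧ i ≤ g + s - 1))

-- gSel = the accepted indices bLoop adds on top of its accumulator
def gSel (xs : List Int) (s thr : Int) : List Int → List Int → List Int
  | [], _ => []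
  | i :: rest, B =>
    if thr ≤ vv xs i then []
    else if blk s i B then gSel xs s thr rest B
    else i :: gSel xs s thr rest (B ++ [i])

theorem gSel_cons (xs : List Int) (s thr i : Int) (rest B : List Int) :
    gSel xs s thr (i :: rest) B =
      if thr ≤ vv xs i then []
      else if blk s i B then gSel xs s thr rest B
      else i :: gSel xs s thr rest (B ++ [i]) := rfl

theorem bLoop_cons (xs : List Int) (s thr i : Int) (rest acc : List Int) :
    bLoop xs s thr (i :: rest) acc =
      if thr ≤ PySem.List.pyGetD xs i 0 then acc
      else if acc.all (fun g => !(decide (g - s ≤ i ∧ i ≤ g + s - 1))) then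
        bLoop xs s thr rest (acc ++ [i])
      else bLoop xs s thr rest acc := rfl

theorem all_not_eq_not_any {α : Type} (p : α → Bool) (l : List α) :
    (l.all fun a => !p a) = !(l.any p) := by
  induction l with
  | nil => rfl
  | cons x t ih => simp [List.all_cons, List.any_cons, ih]

theorem blk_def (s i : Int) (B : List Int) :
    (B.any fun g => decide (g - s ≤ i ∧ i ≤ g + s - 1)) = blk s i B := rfl

theorem bLoop_eq_gSel (xs : List Int) (s thr : Int) : ∀ (C acc : List Int),
    bLoop xs s thr C acc = acc ++ gSel xs s thr C acc := by
  intro C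
  induction C with
  | nil => intro acc; simp [bLoop, gSel]
  | cons i rest ih =>
    intro acc
    rw [bLoop_cons, gSel_cons]
    by_cases hthr : thr ≤ PySem.List.pyGetD xs i 0
    · rw [if_pos hthr, if_pos (show thr ≤ vv xs i from hthr)]
      simp
    · rw [if_neg hthr, if_neg (show ¬ thr ≤ vv xs i from hthr), all_not_eq_not_any, blk_def]
      cases hb : blk s i acc with
      | true => simp [ih]
      | false => simp [ih]

theorem gSel_nil_of_ge {xs : List Int} {s thr : Int} {C B : List Int}
    (h : ∀ j ∈ C, thr ≤ vv xs j) : gSel xs s thr C B = [] := by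
  cases C with
  | nil => rfl
  | cons i rest => rw [gSel_cons, if_pos (h i (List.mem_cons_self))]

theorem blk_perm {s i : Int} {B B' : List Int} (h : B.Perm B') : blk s i B = blk s i B' := by
  unfold blk
  rcases hb : B.any (fun g => decide (g - s ≤ i ∧ i ≤ g + s - 1)) with _ | _
  · symm
    rw [Bool.eq_false_iff]
    intro hc
    rw [List.any_eq_true] at hc
    obtain ⟨g, hg, hgp⟩ := hc
    have : B.any (fun g => decide (g - s ≤ i ∧ i ≤ g + s - 1)) = true :=
      List.any_eq_true.mpr ⟨g, h.mem_iff.mpr hg, hgp⟩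
    rw [hb] at this; exact absurd this (by simp)
  · symm
    rw [List.any_eq_true] at hb ⊢
    obtain ⟨g, hg, hgp⟩ := hb
    exact ⟨g, h.mem_iff.mp hg, hgp⟩

theorem gSel_congrB (xs : List Int) (s thr : Int) : ∀ (C B B' : List Int), B.Perm B' →
    gSel xs s thr C B = gSel xs s thr C B' := by
  intro C
  induction C with
  | nil => intro B B' _; rfl
  | cons i rest ih =>
    intro B B' h
    rw [gSel_cons, gSel_cons, blk_perm h, ih B B' h, ih (B ++ [i]) (B' ++ [i]) (h.append (List.Perm.refl _))]

theorem perm_shuffle (BL BR : List Int) (g j : Int) :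
    ((BL ++ [g] ++ BR) ++ [j]).Perm ((BL ++ [j]) ++ [g] ++ BR) := by
  have h1 : (BL ++ [g] ++ BR) ++ [j] = BL ++ (g :: (BR ++ [j])) := by simp
  have h2 : (BL ++ [j]) ++ [g] ++ BR = BL ++ (j :: g :: BR) := by simp
  rw [h1, h2]
  exact List.Perm.append_left BL
    ((List.Perm.cons g List.perm_append_comm).trans (List.Perm.swap j g BR))

-- split a greedy run below a picked minimum g into independent left/right runs
theorem gSel_split (xs : List Int) (s thr : Int) (hs : 1 ≤ s) : ∀ (C : List Int) (g : Int) (BL BR : List Int),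
    C.Pairwise (fun a b => vv xs a ≤ vv xs b) →
    (∀ b ∈ BL, b < g - s) → (∀ b ∈ BR, g + s ≤ b) →
    (gSel xs s thr C (BL ++ [g] ++ BR)).Perm
      (gSel xs s thr (C.filter (fun j => decide (j < g - s))) BL ++
       gSel xs s thr (C.filter (fun j => decide (g + s ≤ j))) BR) := by
  intro C
  induction C with
  | nil => intro g BL BR _ _ _; simp [gSel]
  | cons j rest ih =>
    intro g BL BR hpw hBL hBR
    have hrest := (List.pairwise_cons.mp hpw).2
    have hj := (List.pairwise_cons.mp hpw).1
    by_cases hthr : thr ≤ vv xs j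
    · have hL : gSel xs s thr ((j :: rest).filter (fun j => decide (j < g - s))) BL = [] := by
        apply gSel_nil_of_ge
        intro k hk
        have hk' : k ∈ j :: rest := List.mem_of_mem_filter hk
        rcases List.mem_cons.mp hk' with rfl | hk''
        · exact hthr
        · exact le_trans hthr (hj k hk'')
      have hR : gSel xs s thr ((j :: rest).filter (fun j => decide (g + s ≤ j))) BR = [] := by
        apply gSel_nil_of_ge
        intro k hk
        have hk' : k ∈ j :: rest := List.mem_of_mem_filter hk
        rcases List.mem_cons.mp hk' with rfl | hk''
        · exact hthr
        · exact le_trans hthr (hj k hk'')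
      rw [gSel_cons, if_pos hthr, hL, hR]
      simp
    · by_cases h1 : j < g - s
      · -- left region
        have hblk : blk s j (BL ++ [g] ++ BR) = blk s j BL := by
          unfold blk
          simp only [List.any_append, List.any_cons, List.any_nil]
          have hg : (decide (g - s ≤ j ∧ j ≤ g + s - 1)) = false := by
            simp; omega
          have hBRany : BR.any (fun b => decide (b - s ≤ j ∧ j ≤ b + s - 1)) = false := by
            rw [Bool.eq_false_iff]
            intro hc
            rw [List.any_eq_true] at hc
            obtain ⟨b, hb, hbp⟩ := hc
            have := hBR b hb
            simp at hbp
            omega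
          rw [hg, hBRany]
          simp
        have hfL : (j :: rest).filter (fun j' => decide (j' < g - s)) =
            j :: rest.filter (fun j' => decide (j' < g - s)) := by
          simp [h1]
        have hfR : (j :: rest).filter (fun j' => decide (g + s ≤ j')) =
            rest.filter (fun j' => decide (g + s ≤ j')) := by
          simp [List.filter_cons]
          omega
        rw [hfL, hfR]
        cases hb : blk s j BL with
        | true =>
          rw [gSel_cons, if_neg hthr, hblk, hb, if_pos rfl]
          rw [gSel_cons, if_neg hthr, hb, if_pos rfl]
          exact ih g BL BR hrest hBL hBR
        | false =>
          rw [gSel_cons, if_neg hthr, hblk, hb, if_neg Bool.false_ne_true]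
          rw [gSel_cons (B := BL), if_neg hthr, hb, if_neg Bool.false_ne_true]
          rw [gSel_congrB xs s thr rest _ _ (perm_shuffle BL BR g j)]
          simp only [List.cons_append]
          refine List.Perm.cons j ?_
          have hBL' : ∀ b ∈ BL ++ [j], b < g - s := by
            intro b hb'
            rcases List.mem_append.mp hb' with h | h
            · exact hBL b h
            · simp at h; omega
          exact ih g (BL ++ [j]) BR hrest hBL' hBR
      · by_cases h2 : g + s ≤ j
        · -- right region
          have hblk : blk s j (BL ++ [g] ++ BR) = blk s j BR := by
            unfold blk
            simp only [List.any_append, List.any_cons, List.any_nil]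
            have hg : (decide (g - s ≤ j ∧ j ≤ g + s - 1)) = false := by
              simp; omega
            have hBLany : BL.any (fun b => decide (b - s ≤ j ∧ j ≤ b + s - 1)) = false := by
              rw [Bool.eq_false_iff]
              intro hc
              rw [List.any_eq_true] at hc
              obtain ⟨b, hb, hbp⟩ := hc
              have := hBL b hb
              simp at hbp
              omega
            rw [hg, hBLany]
            simp
          have hfL : (j :: rest).filter (fun j' => decide (j' < g - s)) =
              rest.filter (fun j' => decide (j' < g - s)) := by
            simp [List.filter_cons]
            omega
          have hfR : (j :: rest).filter (fun j' => decide (g + s ≤ j')) =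
              j :: rest.filter (fun j' => decide (g + s ≤ j')) := by
            simp [h2]
          rw [hfL, hfR]
          cases hb : blk s j BR with
          | true =>
            rw [gSel_cons, if_neg hthr, hblk, hb, if_pos rfl]
            rw [gSel_cons (B := BR), if_neg hthr, hb, if_pos rfl]
            exact ih g BL BR hrest hBL hBR
          | false =>
            rw [gSel_cons, if_neg hthr, hblk, hb, if_neg Bool.false_ne_true]
            rw [gSel_cons (B := BR), if_neg hthr, hb, if_neg Bool.false_ne_true]
            rw [show (BL ++ [g] ++ BR) ++ [j] = BL ++ [g] ++ (BR ++ [j]) by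
              simp [List.append_assoc]]
            have hBR' : ∀ b ∈ BR ++ [j], g + s ≤ b := by
              intro b hb'
              rcases List.mem_append.mp hb' with h | h
              · exact hBR b h
              · simp at h; omega
            exact (List.Perm.cons j (ih g BL (BR ++ [j]) hrest hBL hBR')).trans
              List.perm_middle.symm
        · -- middle: blocked by g
          have hblk : blk s j (BL ++ [g] ++ BR) = true := by
            unfold blk
            simp only [List.any_append, List.any_cons, List.any_nil]
            have hg : (decide (g - s ≤ j ∧ j ≤ g + s - 1)) = true := by
              simp; omega
            rw [hg]; simp
          have hfL : (j :: rest).filter (fun j' => decide (j' < g - s)) =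
              rest.filter (fun j' => decide (j' < g - s)) := by
            simp [List.filter_cons]
            omega
          have hfR : (j :: rest).filter (fun j' => decide (g + s ≤ j')) =
              rest.filter (fun j' => decide (g + s ≤ j')) := by
            simp [List.filter_cons]
            omega
          rw [gSel_cons, if_neg hthr, hblk, if_pos rfl, hfL, hfR]
          exact ih g BL BR hrest hBL hBR

-- lexicographic (value, index) order that the stable sort produces
def lexI (xs : List Int) (a b : Int) : Prop :=
  vv xs a < vv xs b ∨ (vv xs a = vv xs b ∧ a < b)

theorem lexI_trans {xs : List Int} {a b c : Int} (h1 : lexI xs a b) (h2 : lexI xs b c) : lexI xs a c := by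
  unfold lexI at *
  omega

theorem lexI_le {xs : List Int} {a b : Int} (h : lexI xs a b) : vv xs a ≤ vv xs b := by
  unfold lexI at h; omega

theorem insertBy_lex (xs : List Int) (x : Int) : ∀ (acc : List Int),
    acc.Pairwise (lexI xs) → (∀ y ∈ acc, y < x) →
    (PySem.List.insertBy (fun a b => decide (vv xs a < vv xs b)) x acc).Pairwise (lexI xs) := by
  intro acc
  induction acc with
  | nil => intro _ _; simp [PySem.List.insertBy]
  | cons y ys ih =>
    intro hpw hidx
    have hys := (List.pairwise_cons.mp hpw).2
    have hy := (List.pairwise_cons.mp hpw).1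
    show (PySem.List.insertBy _ x (y :: ys)).Pairwise (lexI xs)
    rw [PySem.List.insertBy]
    by_cases hc : vv xs x < vv xs y
    · rw [if_pos (by simp [hc])]
      refine List.pairwise_cons.mpr ⟨?_, hpw⟩
      intro z hz
      rcases List.mem_cons.mp hz with rfl | hz'
      · exact Or.inl hc
      · exact lexI_trans (Or.inl hc) (hy z hz')
    · rw [if_neg (by simp [hc])]
      refine List.pairwise_cons.mpr ⟨?_, ih hys (fun z hz => hidx z (by simp [hz]))⟩
      intro z hz
      rw [PySem.List.mem_insertBy] at hz
      rcases hz with rfl | hz'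
      · rcases lt_or_eq_of_le (not_lt.mp hc) with h | h
        · exact Or.inl h
        · exact Or.inr ⟨h, hidx y (by simp)⟩
      · exact hy z hz'

theorem sorted_stable_pairwise (xs : List Int) : ∀ (L acc : List Int),
    L.Pairwise (· < ·) → acc.Pairwise (lexI xs) → (∀ y ∈ acc, ∀ x ∈ L, y < x) →
    (L.foldl (fun acc x => PySem.List.insertBy (fun a b => decide (vv xs a < vv xs b)) x acc) acc).Pairwise (lexI xs) := by
  intro L
  induction L with
  | nil => intro acc _ hacc _; exact hacc
  | cons x t ih =>
    intro acc hL hacc hcross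
    simp only [List.foldl_cons]
    apply ih _ (List.pairwise_cons.mp hL).2
    · exact insertBy_lex xs x acc hacc (fun y hy => hcross y hy x (by simp))
    · intro y hy z hz
      rw [PySem.List.mem_insertBy] at hy
      rcases hy with rfl | hy'
      · exact (List.pairwise_cons.mp hL).1 z hz
      · exact hcross y hy' z (by simp [hz])

theorem sorted_key_stable (xs L : List Int) (hL : L.Pairwise (· < ·)) :
    (PySem.List.sorted L (fun i => vv xs i) false).Pairwise (lexI xs) := by
  rw [PySem.List.sorted_eq_foldl_insertBy]
  exact sorted_stable_pairwise xs L [] hL (by simp) (by simp)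

-- main equivalence: greedy over a lex-sorted candidate list = the interval recursion
theorem gSel_eq_bGo (xs : List Int) (s thr : Int) (hs : 1 ≤ s) : ∀ fuel (lo hi : Nat) (C : List Int),
    lo ≤ hi → hi ≤ xs.length → hi - lo < fuel →
    C.Perm (PySem.List.pyRange (lo : Int) (hi : Int) 1) → C.Pairwise (lexI xs) →
    (gSel xs s thr C []).Perm (bGo fuel xs s thr lo hi) := by
  intro fuel
  induction fuel with
  | zero => intro lo hi C h1 h2 h3; omega
  | succ fuel ih =>
    intro lo hi C h1 h2 h3 hperm hlex
    have hCmem : ∀ j : Int, j ∈ C ↔ (lo : Int) ≤ j ∧ j < (hi : Int) := by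
      intro j
      rw [hperm.mem_iff, PySem.List.mem_pyRange_one]
    cases C with
    | nil =>
      have hle : hi ≤ lo := by
        by_contra hc
        have : (lo : Int) ∈ ([] : List Int) := (hCmem lo).mpr ⟨le_refl _, by exact_mod_cast Nat.lt_of_not_le hc⟩
        simp at this
      simp [gSel, bGo, hle]
    | cons i0 rest =>
      have hi0 : (lo : Int) ≤ i0 ∧ i0 < (hi : Int) := (hCmem i0).mp (by simp)
      have hlt : lo < hi := by
        have := hi0.1.trans_lt hi0.2
        exact_mod_cast this
      have hle : ¬ hi ≤ lo := by omega
      have hnodup : (i0 :: rest).Nodup :=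
        hperm.nodup_iff.mpr (PySem.List.nodup_pyRange_one _ _)
      have hi0nr : i0 ∉ rest := (List.nodup_cons.mp hnodup).1
      have hrmem : ∀ j : Int, j ∈ rest ↔ ((lo : Int) ≤ j ∧ j < (hi : Int)) ∧ j ≠ i0 := by
        intro j
        constructor
        · intro hj
          refine ⟨(hCmem j).mp (by simp [hj]), ?_⟩
          rintro rfl
          exact hi0nr hj
        · rintro ⟨hj, hne⟩
          rcases List.mem_cons.mp ((hCmem j).mpr hj) with rfl | h
          · exact absurd rfl hne
          · exact h
      have hi0nn : 0 ≤ i0 := le_trans (by positivity) hi0.1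
      set gN : Nat := i0.toNat with hgN
      have hgNc : (gN : Int) = i0 := Int.toNat_of_nonneg hi0nn
      have hvvN : ∀ (k : Nat), vv xs (k : Int) = xs.getD k 0 := by
        intro k
        unfold vv
        exact PySem.List.pyGetD_natCast xs k 0
      have hvv0 : vv xs i0 = xs.getD gN 0 := by
        rw [← hgNc, hvvN]
      have hlex0 := (List.pairwise_cons.mp hlex).1
      have hlam : LAM xs lo hi gN := by
        refine ⟨by omega, by omega, ?_, ?_⟩
        · intro k hk1 hk2
          by_cases hkg : k = gN
          · subst hkg; rfl
          · have hkC : (k : Int) ∈ rest := by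
              rw [hrmem]
              constructor
              · constructor <;> [exact_mod_cast hk1; exact_mod_cast hk2]
              · intro hc; apply hkg; rw [← hgNc] at hc; exact_mod_cast hc
            have := hlex0 _ hkC
            rw [← hvv0, ← hvvN k]
            exact lexI_le this
        · intro k hk1 hk2
          have hkg : k ≠ gN := by omega
          have hkC : (k : Int) ∈ rest := by
            rw [hrmem]
            constructor
            · constructor <;> [exact_mod_cast hk1; exact_mod_cast (by omega : k < hi)]
            · intro hc; apply hkg; rw [← hgNc] at hc; exact_mod_cast hc
          have hl := hlex0 _ hkC
          rw [← hvv0, ← hvvN k]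
          rcases hl with h | ⟨he, hlt'⟩
          · exact h
          · exfalso
            have : i0 < (k : Int) := hlt'
            rw [← hgNc] at this
            have : gN < k := by exact_mod_cast this
            omega
      have hbase : LAM xs lo (lo+1) lo := by
        refine ⟨le_refl _, by omega, ?_, ?_⟩
        · intro k hk1 hk2
          have : k = lo := by omega
          subst this; rfl
        · intro k hk1 hk2; omega
      have hgl : LAM xs lo hi (bArgmin xs lo (lo+1) hi) :=
        bArgmin_LAM xs lo lo (lo+1) hi (by omega) hbase
      have hgeq : gN = bArgmin xs lo (lo+1) hi := LAM_unique hlam hgl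
      by_cases hthr : thr ≤ vv xs i0
      · have hnt : thr ≤ xs.getD (bArgmin xs lo (lo+1) hi) 0 := by
          rw [← hgeq, ← hvv0]; exact hthr
        rw [gSel_cons, if_pos hthr]
        simp [bGo, hle]
        rw [← List.getD_eq_getElem?_getD]
        exact hnt
      · have hnt : ¬ thr ≤ xs.getD (bArgmin xs lo (lo+1) hi) 0 := by
          rw [← hgeq, ← hvv0]; exact hthr
        have hrestpw : rest.Pairwise (fun a b => vv xs a ≤ vv xs b) :=
          ((List.pairwise_cons.mp hlex).2).imp lexI_le
        have hrestlex : rest.Pairwise (lexI xs) := (List.pairwise_cons.mp hlex).2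
        have hsplit := gSel_split xs s thr hs rest i0 [] [] hrestpw (by simp) (by simp)
        have hstep : gSel xs s thr (i0 :: rest) [] = i0 :: gSel xs s thr rest ([] ++ [i0] ++ []) := by
          rw [gSel_cons, if_neg hthr, show blk s i0 [] = false from rfl,
            if_neg Bool.false_ne_true]
          simp
        rw [hstep]
        simp only [bGo, if_neg hle, if_neg hnt]
        rw [← hgeq, hgNc]
        refine List.Perm.cons i0 (hsplit.trans (List.Perm.append ?_ ?_))
        · -- left part
          by_cases c1 : i0 - s ≥ (lo : Int)
          · rw [if_pos c1]
            have hcast : ((i0 - s).toNat : Int) = i0 - s := Int.toNat_of_nonneg (by omega)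
            apply ih lo (i0 - s).toNat
            · omega
            · omega
            · omega
            · refine (List.perm_ext_iff_of_nodup
                  (List.Sublist.nodup List.filter_sublist (List.nodup_cons.mp hnodup).2)
                  (PySem.List.nodup_pyRange_one _ _)).mpr ?_
              intro a
              rw [List.mem_filter, PySem.List.mem_pyRange_one, hrmem, hcast]
              constructor
              · rintro ⟨⟨⟨hal, hah⟩, hne⟩, hlt'⟩
                simp at hlt'
                omega
              · intro ⟨hal, hah⟩
                refine ⟨⟨⟨hal, by omega⟩, by intro hc; omega⟩, by simp; omega⟩
            · exact hrestlex.sublist List.filter_sublist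
          · rw [if_neg c1]
            have hempty : rest.filter (fun j => decide (j < i0 - s)) = [] := by
              rw [List.eq_nil_iff_forall_not_mem]
              intro a ha
              rw [List.mem_filter] at ha
              have := (hrmem a).mp ha.1
              have h2' := ha.2
              simp at h2'
              omega
            rw [hempty]
            simp [gSel]
        · -- right part
          by_cases c2 : i0 + s ≤ (hi : Int) - 1
          · rw [if_pos c2]
            have hcast : ((i0 + s).toNat : Int) = i0 + s := Int.toNat_of_nonneg (by omega)
            apply ih (i0 + s).toNat hi
            · omega
            · omega
            · omega
            · refine (List.perm_ext_iff_of_nodup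
                  (List.Sublist.nodup List.filter_sublist (List.nodup_cons.mp hnodup).2)
                  (PySem.List.nodup_pyRange_one _ _)).mpr ?_
              intro a
              rw [List.mem_filter, PySem.List.mem_pyRange_one, hrmem, hcast]
              constructor
              · rintro ⟨⟨⟨hal, hah⟩, hne⟩, hlt'⟩
                simp at hlt'
                omega
              · intro ⟨hal, hah⟩
                refine ⟨⟨⟨by omega, hah⟩, by intro hc; omega⟩, by simp; omega⟩
            · exact hrestlex.sublist List.filter_sublist
          · rw [if_neg c2]
            have hempty : rest.filter (fun j => decide (i0 + s ≤ j)) = [] := by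
              rw [List.eq_nil_iff_forall_not_mem]
              intro a ha
              rw [List.mem_filter] at ha
              have := (hrmem a).mp ha.1
              have h2' := ha.2
              simp at h2'
              omega
            rw [hempty]
            simp [gSel]

theorem final (xs : List Int) (shift thr : Int)
    (hpre : 1 ≤ shift ∨ ∀ x ∈ xs, thr ≤ x) :
    find_list_of_local_minimum_of_intensity_sum_index xs shift thr =
      find_list_of_local_minimum_of_intensity_sum_index_alt xs shift thr := by
  have horder : find_list_of_local_minimum_of_intensity_sum_index_alt xs shift thr =
      PySem.List.sorted (gSel xs shift thr
        (PySem.List.sorted (PySem.List.pyRange 0 (xs.length : Int) 1) (fun i => vv xs i) false) [])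
        (fun x => x) false := by
    unfold find_list_of_local_minimum_of_intensity_sum_index_alt
    rw [bLoop_eq_gSel]
    rfl
  rcases hpre with hs | hall
  · set C0 := PySem.List.sorted (PySem.List.pyRange 0 (xs.length : Int) 1) (fun i => vv xs i) false with hC0
    have hC0perm : C0.Perm (PySem.List.pyRange ((0:Nat) : Int) ((xs.length : Nat) : Int) 1) := by
      rw [hC0]
      exact_mod_cast PySem.List.sorted_perm _ _ _
    have hC0lex : C0.Pairwise (lexI xs) :=
      sorted_key_stable xs _ (PySem.List.pairwise_lt_pyRange_one _ _)
    have hpermB : (gSel xs shift thr C0 []).Perm (bGo (xs.length + 1) xs shift thr 0 xs.length) :=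
      gSel_eq_bGo xs shift thr hs (xs.length + 1) 0 xs.length C0 (by omega) (le_refl _) (by omega) hC0perm hC0lex
    have hwin : win xs 0 xs.length = xs := by simp [win]
    have hpermA := main_perm xs shift thr hs (xs.length+1) 0 xs.length (by omega) (le_refl _) (by omega)
    rw [hwin] at hpermA
    have hmap : (fAuxA (xs.length+1) xs shift thr).map (fun e => e + ((0:Nat):Int)) = fAuxA (xs.length+1) xs shift thr := by
      simp
    rw [hmap] at hpermA
    have hsorted := (fAuxA_sorted shift thr hs (xs.length+1) xs).1
    have hchain : (fAuxA (xs.length+1) xs shift thr).Perm (gSel xs shift thr C0 []) :=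
      hpermA.trans hpermB.symm
    rw [horder]
    unfold find_list_of_local_minimum_of_intensity_sum_index
    exact (PySem.List.sorted_eq_of_perm_of_pairwise_lt _ _ (fun x => x) hchain hsorted).symm
  · -- every element at least the threshold: both sides return []
    have hA : fAuxA (xs.length + 1) xs shift thr = [] := by
      cases hxs : xs with
      | nil => rfl
      | cons x t =>
        have hlen : xs.length = t.length + 1 := by rw [hxs]; rfl
        cases hm : PySem.List.min? xs (fun x => x) with
        | none =>
          rw [PySem.List.min?_eq_none_iff] at hm
          rw [hm] at hlen; simp at hlen
        | some m =>
          have hmem : m ∈ xs := PySem.List.min?_mem hm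
          have hthr : ¬ m < thr := not_lt.mpr (hall m hmem)
          have h0 : ¬ xs.length = 0 := by omega
          rw [← hxs]
          cases hfl : xs.length with
          | zero => omega
          | succ k =>
            simp [fAuxA, h0, hm, hthr]
    have hB : gSel xs shift thr
        (PySem.List.sorted (PySem.List.pyRange 0 (xs.length : Int) 1) (fun i => vv xs i) false) [] = [] := by
      apply gSel_nil_of_ge
      intro j hj
      rw [PySem.List.mem_sorted, PySem.List.mem_pyRange_one] at hj
      have hj0 : 0 ≤ j := hj.1
      have hjl : j.toNat < xs.length := by omega
      have : vv xs j = xs.getD j.toNat 0 := by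
        unfold vv
        rw [show j = (j.toNat : Int) from (Int.toNat_of_nonneg hj0).symm, PySem.List.pyGetD_natCast]
        rw [Int.toNat_natCast]
      rw [this, List.getD_eq_getElem _ _ hjl]
      exact hall _ (List.getElem_mem _)
    rw [horder, hB]
    unfold find_list_of_local_minimum_of_intensity_sum_index
    rw [hA]
    rfl

-- ===== VERDICT (by name: the statement is the Claim_ definition above) =====
theorem find_list_of_local_minimum_of_intensity_sum_index_spec : Claim_equal_find_list_of_local_minimum_of_intensity_sum_index := by
  intro listOfIntensitySum shiftAwayLocalMinimum threshold _ hpre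
  unfold Spec_find_list_of_local_minimum_of_intensity_sum_index
  exact final listOfIntensitySum shiftAwayLocalMinimum threshold hpre
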